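-- pv_equiv track=rewrite | github.com/cangorur/human_robot_collaboration | code/results/userStudies_exp1_results/human_model_validation/human_model_validation.py | removeRepeatingObs
-- ===== SOURCE A (Python) =====
-- def removeRepeatingObs(old_obs):
--
--     new_obs = []
--     for user_id in range(len(old_obs)):
--         curr_user = old_obs[user_id]
--         new_obs_arr = []
--         #prev_obs = curr_user[0]
--         #new_obs_arr.append[prev_obs]
--         for i in range(len(curr_user)):
--             if i == 0:
--                 prev_obs = curr_user[i]
--                 new_obs_arr.append(prev_obs)
--                 continue
--             curr_obs = curr_user[i]
--             if prev_obs != curr_obs: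
--                 new_obs_arr.append(curr_obs)
--                 prev_obs = curr_obs
--         new_obs.append(new_obs_arr)
--     return new_obs
-- ===== SOURCE B (Python) =====
-- def removeRepeatingObs(old_obs):
--     return [_dedup(user) for user in old_obs]
--
-- def _dedup(seq):
--     # divide and conquer: dedup each half, then merge the halves,
--     # dropping the right half's first element when it equals the
--     # left half's last kept element
--     if len(seq) <= 1:
--         return list(seq)
--     m = len(seq) // 2
--     left = _dedup(seq[:m])
--     right = _dedup(seq[m:])
--     if left[-1] == right[0]:
--         return left + right[1:]
--     return left + right
-- ===== Notes on version B (the rewrite author's own statement) =====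
-- stated objective: alternative
-- what changed: Replaces A's stateful left-to-right scan (prev_obs carried through the loop) by a divide-and-conquer recursion: each user's list is split in half, each half is deduplicated recursively, and the halves are concatenated, dropping the right half's head when it equals the left half's last kept element.
import Mathlib
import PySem

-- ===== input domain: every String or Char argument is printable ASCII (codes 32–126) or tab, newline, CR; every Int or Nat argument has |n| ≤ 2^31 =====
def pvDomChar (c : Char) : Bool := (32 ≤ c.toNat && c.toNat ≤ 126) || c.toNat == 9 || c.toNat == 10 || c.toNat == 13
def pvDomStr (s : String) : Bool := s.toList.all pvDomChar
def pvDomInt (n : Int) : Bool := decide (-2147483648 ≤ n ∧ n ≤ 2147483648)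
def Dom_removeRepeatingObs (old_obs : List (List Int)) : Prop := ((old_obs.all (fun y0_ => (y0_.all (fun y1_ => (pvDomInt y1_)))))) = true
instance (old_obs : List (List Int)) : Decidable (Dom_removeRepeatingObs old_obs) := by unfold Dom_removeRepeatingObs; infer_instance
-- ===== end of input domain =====

-- B replaces A's stateful left-to-right scan by a divide-and-conquer recursion (split in half, dedup each half, merge at the boundary); alternative decomposition, same result.

-- ===== PORT A =====
-- body of A's inner loop over one user: state (prev_obs : Option Int — none before i = 0 assigns it, new_obs_arr).
-- The 'none' branch at i ≠ 0 is unreachable in Python (prev_obs is assigned at i = 0 first); it leaves the state unchanged.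
def pvBodyA (curr : List Int) (st : Option Int × List Int) (i : Int) : Option Int × List Int :=
  if i == 0 then
    let p := PySem.List.pyGetD curr i 0
    (some p, st.2 ++ [p])
  else
    let c := PySem.List.pyGetD curr i 0
    match st.1 with
    | some p => if p ≠ c then (some c, st.2 ++ [c]) else st
    | none => st

def pvInnerA (curr : List Int) : List Int :=
  ((PySem.List.pyRange 0 (curr.length : Int) 1).foldl (pvBodyA curr) (none, [])).2

def removeRepeatingObs (old_obs : List (List Int)) : List (List Int) :=
  (PySem.List.pyRange 0 (old_obs.length : Int) 1).foldl
    (fun new_obs user_id => new_obs ++ [pvInnerA (PySem.List.pyGetD old_obs user_id [])]) []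

-- ===== PORT B =====
-- _dedup: divide and conquer; seq[:m] / seq[m:] / right[1:] are PySem slices, left[-1] / right[0] are PySem gets
def pvDedup (seq : List Int) : List Int :=
  if seq.length ≤ 1 then seq
  else
    let m := PySem.Int.floordiv (seq.length : Int) 2
    let left := pvDedup (PySem.List.slice seq none (some m))
    let right := pvDedup (PySem.List.slice seq (some m) none)
    if PySem.List.pyGetD left (-1) 0 == PySem.List.pyGetD right 0 0 then
      left ++ PySem.List.slice right (some 1) none
    else
      left ++ right
termination_by seq.length
decreasing_by
  · have hm : PySem.Int.floordiv (seq.length : Int) 2 = ((seq.length / 2 : Nat) : Int) := by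
      exact_mod_cast PySem.Int.floordiv_natCast seq.length 2
    rw [hm, PySem.List.slice_to_natCast]
    simp; omega
  · have hm : PySem.Int.floordiv (seq.length : Int) 2 = ((seq.length / 2 : Nat) : Int) := by
      exact_mod_cast PySem.Int.floordiv_natCast seq.length 2
    rw [hm, PySem.List.slice_from_natCast]
    simp; omega

def removeRepeatingObs_alt (old_obs : List (List Int)) : List (List Int) :=
  old_obs.map pvDedup

-- ===== PRECONDITION & SPEC =====
def Spec_removeRepeatingObs (old_obs : List (List Int)) (out : List (List Int)) : Prop := out = removeRepeatingObs_alt old_obs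
instance (old_obs : List (List Int)) (out : List (List Int)) : Decidable (Spec_removeRepeatingObs old_obs out) := by unfold Spec_removeRepeatingObs; infer_instance

-- ===== CLAIM (what is proved, stated in full; the proofs are below) =====
def Claim_equal_removeRepeatingObs : Prop := ∀ (old_obs : List (List Int)), Dom_removeRepeatingObs old_obs → Spec_removeRepeatingObs old_obs (removeRepeatingObs old_obs)

-- ===== LEMMAS AND PROOFS =====

-- A's inner-loop body once prev_obs has been set (the i ≠ 0 branch, on the element itself)
def pvStep (st : Option Int × List Int) (c : Int) : Option Int × List Int :=
  match st.1 with
  | some q => if q ≠ c then (some c, st.2 ++ [c]) else st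
  | none => st

-- reference recursion for A's inner loop after the first element
def pvGo (p : Int) : List Int → List Int
  | [] => []
  | y :: ys => if p ≠ y then y :: pvGo y ys else pvGo p ys

-- reference form of the whole dedup of one user
def pvCollapse : List Int → List Int
  | [] => []
  | x :: xs => x :: pvGo x xs

lemma foldl_pvStep_go (xs : List Int) : ∀ (p : Int) (acc : List Int),
    (xs.foldl pvStep (some p, acc)).2 = acc ++ pvGo p xs := by
  induction xs with
  | nil => intro p acc; simp [pvGo]
  | cons y ys ih =>
    intro p acc
    rw [List.foldl_cons]
    by_cases h : p = y
    · have hs : pvStep (some p, acc) y = (some p, acc) := by simp [pvStep, h]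
      rw [hs, ih p acc, pvGo]
      simp [h]
    · have hs : pvStep (some p, acc) y = (some y, acc ++ [y]) := by simp [pvStep, h]
      rw [hs, ih y (acc ++ [y]), pvGo]
      simp [h]

lemma pvInnerA_eq_collapse (curr : List Int) : pvInnerA curr = pvCollapse curr := by
  match curr with
  | [] => simp [pvInnerA, pvCollapse, PySem.List.pyRange_one_eq_nil]
  | x :: xs =>
    unfold pvInnerA
    rw [PySem.List.pyRange_one_cons (by exact_mod_cast Nat.succ_pos xs.length)]
    rw [List.foldl_cons]
    have h0 : pvBodyA (x :: xs) (none, []) 0 = (some x, [x]) := by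
      simp [pvBodyA, PySem.List.pyGetD, PySem.List.pyIdx?, PySem.List.pyGet?]
    rw [h0]
    have h1 : ∀ (st : Option Int × List Int) (i : Int),
        i ∈ PySem.List.pyRange 1 ((x :: xs).length : Int) 1 →
        pvBodyA (x :: xs) st i = pvStep st (PySem.List.pyGetD (x :: xs) i 0) := by
      intro st i hi
      have h1i : (1 : Int) ≤ i := (PySem.List.mem_pyRange_one.mp hi).1
      have hne : (i == 0) = false := by simp; omega
      simp [pvBodyA, pvStep, hne]
    simp only [show (0:Int)+1 = 1 from rfl]
    rw [PySem.List.foldl_congr_mem _ _ _ _ h1]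
    rw [PySem.List.foldl_pyRange_pyGetD' (x :: xs) 0 pvStep (some x, [x]) (by norm_num)]
    simp only [Int.toNat_one, List.drop_succ_cons, List.drop_zero]
    rw [foldl_pvStep_go xs x [x]]
    simp [pvCollapse]

-- the scan distributes over append, continuing from the left part's last element
lemma pvGo_append (as bs : List Int) : ∀ (p : Int),
    pvGo p (as ++ bs) = pvGo p as ++ pvGo (as.getLastD p) bs := by
  induction as with
  | nil => intro p; simp [pvGo]
  | cons a as' ih =>
    intro p
    simp only [List.cons_append, pvGo]
    by_cases h : p = a
    · subst h
      rw [if_neg (fun hc : p ≠ p => hc rfl), if_neg (fun hc : p ≠ p => hc rfl),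
        ih p, List.getLastD_cons]
    · rw [if_pos h, if_pos h, ih a, List.getLastD_cons, List.cons_append]

-- the last kept element is the last element
lemma pvGo_getLastD (xs : List Int) : ∀ (p : Int),
    (pvGo p xs).getLastD p = xs.getLastD p := by
  induction xs with
  | nil => intro p; rfl
  | cons y ys ih =>
    intro p
    by_cases h : p = y
    · subst h
      rw [pvGo, if_neg (fun hc : p ≠ p => hc rfl), ih p, List.getLastD_cons]
    · rw [pvGo, if_pos h, List.getLastD_cons, ih y, List.getLastD_cons]

lemma pvCollapse_ne_nil (xs : List Int) (h : xs ≠ []) : pvCollapse xs ≠ [] := by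
  match xs with
  | x :: xs' => simp [pvCollapse]

lemma pvCollapse_getLastD (xs : List Int) (h : xs ≠ []) (d : Int) :
    (pvCollapse xs).getLastD d = xs.getLastD d := by
  match xs with
  | x :: xs' =>
    show (x :: pvGo x xs').getLastD d = (x :: xs').getLastD d
    rw [List.getLastD_cons, List.getLastD_cons, pvGo_getLastD]

lemma pvCollapse_headD (xs : List Int) (d : Int) :
    (pvCollapse xs).headD d = xs.headD d := by
  match xs with
  | [] => rfl
  | x :: xs' => rfl

lemma pyGetD_neg_one' (l : List Int) (h : l ≠ []) (d : Int) :
    PySem.List.pyGetD l (-1) d = l.getLastD d := by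
  rw [PySem.List.pyGetD_neg_one (h := h), List.getLastD_eq_getLast?,
    List.getLast?_eq_some_getLast h]
  rfl

lemma pyGetD_zero' (l : List Int) (h : l ≠ []) (d : Int) :
    PySem.List.pyGetD l 0 d = l.headD d := by
  match l with
  | x :: l' => simp [PySem.List.pyGetD_zero_cons]

-- merging two deduplicated halves
lemma pvCollapse_append (as bs : List Int) (ha : as ≠ []) (hb : bs ≠ []) :
    pvCollapse (as ++ bs) =
      if as.getLastD 0 = bs.headD 0 then pvCollapse as ++ (pvCollapse bs).tail
      else pvCollapse as ++ pvCollapse bs := by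
  match as, bs with
  | a :: as', b :: bs' =>
    simp only [List.cons_append, pvCollapse, List.headD_cons, List.tail_cons,
      List.getLastD_cons]
    rw [pvGo_append as' (b :: bs') a, pvGo]
    by_cases h : as'.getLastD a = b
    · rw [if_neg (fun hc => hc h), h, if_pos rfl]
    · rw [if_pos h, if_neg h]

lemma pvDedup_eq : ∀ (xs : List Int), pvDedup xs = pvCollapse xs := by
  intro xs
  induction hl : xs.length using Nat.strong_induction_on generalizing xs with
  | _ n ih =>
    subst hl
    rw [pvDedup]
    by_cases hle : xs.length ≤ 1
    · rw [if_pos hle]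
      match xs with
      | [] => rfl
      | [x] => simp [pvCollapse, pvGo]
      | x :: y :: xs' => simp at hle
    · rw [if_neg hle]
      have hm : PySem.Int.floordiv (xs.length : Int) 2 = ((xs.length / 2 : Nat) : Int) := by
        exact_mod_cast PySem.Int.floordiv_natCast xs.length 2
      simp only [hm, PySem.List.slice_to_natCast, PySem.List.slice_from_natCast,
        PySem.List.slice_from_one, beq_iff_eq]
      have h2 : 2 ≤ xs.length := by omega
      have hta : (xs.take (xs.length / 2)).length = xs.length / 2 := by
        simp; omega
      have htb : (xs.drop (xs.length / 2)).length = xs.length - xs.length / 2 := by simp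
      have hna : xs.take (xs.length / 2) ≠ [] := by
        intro hc; rw [hc] at hta; simp at hta; omega
      have hnb : xs.drop (xs.length / 2) ≠ [] := by
        intro hc; rw [hc] at htb; simp at htb; omega
      rw [ih _ (by omega) _ hta, ih _ (by omega) _ htb]
      rw [pyGetD_neg_one' _ (pvCollapse_ne_nil _ hna) 0,
        pyGetD_zero' _ (pvCollapse_ne_nil _ hnb) 0,
        pvCollapse_getLastD _ hna, pvCollapse_headD]
      conv_rhs => rw [← List.take_append_drop (xs.length / 2) xs]
      rw [pvCollapse_append _ _ hna hnb]

-- ===== VERDICT (by name: the statement is the Claim_ definition above) =====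
theorem removeRepeatingObs_spec : Claim_equal_removeRepeatingObs := by
  intro old_obs _
  unfold Spec_removeRepeatingObs removeRepeatingObs removeRepeatingObs_alt
  rw [PySem.List.foldl_pyRange_zero_pyGetD' old_obs [] (fun acc u => acc ++ [pvInnerA u]) []]
  rw [PySem.List.foldl_append_singleton_eq_map]
  simp [pvInnerA_eq_collapse, pvDedup_eq]
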